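-- pv_equiv track=rewrite | github.com/ronanchris/professional-markdown-toolkit-v2 | markdown-processing/notion_complete_fixer.py | reduce_horizontal_rules
-- ===== SOURCE A (Python) =====
-- def reduce_horizontal_rules(text):
--     """Remove excessive horizontal rules that can break Notion import."""
--     lines = text.split('\n')
--     fixed_lines = []
--
--     for line in lines:
--         line_stripped = line.strip()
--
--         # Check if this line is a horizontal rule
--         if line_stripped in ['---', '***', '___']:
--             # Replace with empty line for spacing
--             fixed_lines.append('')
--         else:
--             fixed_lines.append(line)
--
--     return '\n'.join(fixed_lines)
-- ===== SOURCE B (Python) =====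
-- # Single streaming pass over the characters: buffer the current line, and on each
-- # newline (and at the end) emit either the buffered line or '' if it is a horizontal rule.
-- # No split-into-list / rebuild-list / join pipeline.
--
-- def _emit(buf):
--     s = ''.join(buf)
--     return '' if s.strip() in ('---', '***', '___') else s
--
-- def reduce_horizontal_rules(text):
--     out = []
--     buf = []
--     for ch in text:
--         if ch == '\n':
--             out.append(_emit(buf))
--             out.append('\n')
--             buf = []
--         else:
--             buf.append(ch)
--     out.append(_emit(buf))
--     return ''.join(out)
-- ===== Notes on version B (the rewrite author's own statement) =====
-- stated objective: alternative
-- what changed: Replaces the split('\n')/per-line list/'\n'.join pipeline with a single streaming pass over the characters that buffers the current line and emits it (or '' for a horizontal rule) at each newline and at the end.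
import Mathlib
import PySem

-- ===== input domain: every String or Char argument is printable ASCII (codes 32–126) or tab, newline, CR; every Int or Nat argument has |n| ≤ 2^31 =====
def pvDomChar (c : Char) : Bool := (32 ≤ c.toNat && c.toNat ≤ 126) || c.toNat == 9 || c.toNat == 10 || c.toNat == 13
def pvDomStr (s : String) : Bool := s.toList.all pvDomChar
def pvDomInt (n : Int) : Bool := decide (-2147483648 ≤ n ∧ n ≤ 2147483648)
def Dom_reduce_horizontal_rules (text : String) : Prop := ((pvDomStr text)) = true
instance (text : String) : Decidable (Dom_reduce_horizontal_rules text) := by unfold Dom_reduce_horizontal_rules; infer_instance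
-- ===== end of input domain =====

-- B replaces A's split/per-line-list/join pipeline with one streaming pass over the
-- characters (alternative decomposition, same O(n) cost).

-- ===== PORT A =====
-- A: split on '\n', build the list of fixed lines (a rule line becomes ''), join with '\n'.
def reduce_horizontal_rules (text : String) : String :=
  let lines := PySem.Chars.splitOn text.toList ['\n']
  let fixed_lines := lines.foldl (fun acc line =>
    let line_stripped := PySem.Chars.strip line
    acc ++ [if line_stripped = ['-','-','-'] ∨ line_stripped = ['*','*','*'] ∨
              line_stripped = ['_','_','_'] then [] else line]) []
  String.ofList (PySem.Chars.join ['\n'] fixed_lines)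

-- ===== PORT B =====
-- B: emit the buffered line ('' if it is a horizontal rule) at each newline / at the end.
def pvEmit (buf : List Char) : List Char :=
  let s := PySem.Chars.strip buf
  if s = ['-','-','-'] ∨ s = ['*','*','*'] ∨ s = ['_','_','_'] then [] else buf

def pvGo : List Char → List Char → List Char
  | [], buf => pvEmit buf
  | c :: rest, buf => if c = '\n' then pvEmit buf ++ '\n' :: pvGo rest [] else pvGo rest (buf ++ [c])

def reduce_horizontal_rules_alt (text : String) : String :=
  String.ofList (pvGo text.toList [])

-- ===== PRECONDITION & SPEC =====
def Spec_reduce_horizontal_rules (text : String) (out : String) : Prop := out = reduce_horizontal_rules_alt text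
instance (text : String) (out : String) : Decidable (Spec_reduce_horizontal_rules text out) := by unfold Spec_reduce_horizontal_rules; infer_instance

-- ===== CLAIM (what is proved, stated in full; the proofs are below) =====
def Claim_equal_reduce_horizontal_rules : Prop := ∀ (text : String), Dom_reduce_horizontal_rules text → Spec_reduce_horizontal_rules text (reduce_horizontal_rules text)

-- ===== LEMMAS AND PROOFS =====

-- structural characterisation of splitting on '\n'
def splitNL : List Char → List (List Char)
  | [] => [[]]
  | c :: rest => if c = '\n' then [] :: splitNL rest else (splitNL rest).modifyHead (c :: ·)

lemma splitNL_ne_nil (cs : List Char) : splitNL cs ≠ [] := by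
  cases cs with
  | nil => simp [splitNL]
  | cons c rest =>
    simp only [splitNL]
    split_ifs
    · simp
    · cases h : splitNL rest <;> simp_all [splitNL_ne_nil rest]

lemma splitOn_go_spec : ∀ (l cur : List Char) (acc : List (List Char)) (fuel : Nat),
    l.length < fuel →
    PySem.Chars.splitOn.go ['\n'] fuel l cur acc
      = acc.reverse ++ (splitNL l).modifyHead (cur.reverse ++ ·) := by
  intro l
  induction l with
  | nil =>
    intro cur acc fuel hf
    cases fuel with
    | zero => omega
    | succ f => simp [PySem.Chars.splitOn.go, splitNL]
  | cons c rest ih =>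
    intro cur acc fuel hf
    cases fuel with
    | zero => omega
    | succ f =>
      rw [PySem.Chars.splitOn.go]
      by_cases hc : c = '\n'
      · subst hc
        simp only [List.isPrefixOf, BEq.rfl, Bool.true_and, if_true,
          List.length_cons, List.length_nil, Nat.zero_add, List.drop_succ_cons, List.drop_zero]
        rw [ih [] (cur.reverse :: acc) f (by simpa using Nat.lt_of_succ_lt_succ hf)]
        obtain ⟨h0, t0, e0⟩ := List.exists_cons_of_ne_nil (splitNL_ne_nil rest)
        simp [splitNL, e0]
      · have hpre : List.isPrefixOf ['\n'] (c :: rest) = false := by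
          simp [List.isPrefixOf]
          exact fun h => absurd h.symm hc
        rw [hpre]
        simp only [if_false, Bool.false_eq_true]
        rw [ih (c :: cur) acc f (by simpa using Nat.lt_of_succ_lt_succ hf)]
        obtain ⟨h0, t0, e0⟩ := List.exists_cons_of_ne_nil (splitNL_ne_nil rest)
        simp [splitNL, e0, hc]

lemma splitOn_eq_splitNL (cs : List Char) :
    PySem.Chars.splitOn cs ['\n'] = splitNL cs := by
  rw [PySem.Chars.splitOn, splitOn_go_spec cs [] [] (cs.length + 1) (by omega)]
  obtain ⟨h0, t0, e0⟩ := List.exists_cons_of_ne_nil (splitNL_ne_nil cs)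
  simp [e0]

lemma join_cons_cons (x y : List Char) (zs : List (List Char)) :
    PySem.Chars.join ['\n'] (x :: y :: zs) = x ++ '\n' :: PySem.Chars.join ['\n'] (y :: zs) := by
  simp [PySem.Chars.join, List.intercalate]

lemma pvGo_spec : ∀ (cs buf : List Char),
    pvGo cs buf = PySem.Chars.join ['\n'] (((splitNL cs).modifyHead (buf ++ ·)).map pvEmit) := by
  intro cs
  induction cs with
  | nil => intro buf; simp [pvGo, splitNL]
  | cons c rest ih =>
    intro buf
    by_cases hc : c = '\n'
    · subst hc
      obtain ⟨h0, t0, e0⟩ := List.exists_cons_of_ne_nil (splitNL_ne_nil rest)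
      simp only [pvGo, if_true, splitNL, List.modifyHead_cons, List.append_nil, List.map_cons]
      rw [ih [], e0]
      simp [join_cons_cons]
    · obtain ⟨h0, t0, e0⟩ := List.exists_cons_of_ne_nil (splitNL_ne_nil rest)
      simp only [pvGo, hc, if_false]
      rw [ih (buf ++ [c])]
      simp [splitNL, hc, e0]

-- ===== VERDICT (by name: the statement is the Claim_ definition above) =====
theorem reduce_horizontal_rules_spec : Claim_equal_reduce_horizontal_rules := by
  intro text _
  unfold Spec_reduce_horizontal_rules reduce_horizontal_rules reduce_horizontal_rules_alt
  dsimp only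
  rw [PySem.List.foldl_append_singleton_eq_map, splitOn_eq_splitNL, pvGo_spec]
  obtain ⟨h0, t0, e0⟩ := List.exists_cons_of_ne_nil (splitNL_ne_nil text.toList)
  have hEmit : pvEmit = fun line => if PySem.Chars.strip line = ['-','-','-'] ∨
      PySem.Chars.strip line = ['*','*','*'] ∨ PySem.Chars.strip line = ['_','_','_']
      then [] else line := by funext buf; rfl
  rw [hEmit, e0]
  simp
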